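-- pv_equiv track=rewrite | github.com/s-jinipark/pythonTest | _Temp/23년_모의고사/5월/test02.py | solution
-- ===== SOURCE A (Python) =====
-- def solution(grade):
--     total_score = []
--
--     def func_a(param):
--         ret = 0
--         for i in range(len(total_score)):
--             if total_score[i] == param :
--                 ret += 1
--         return ret
--
--
--     def func_b(grade):
--         for i in range(len(grade)):
--             total_score.append(grade[i][0] + grade[i][1])
--
--
--     def func_c():
--         ret = 0
--         for i in range(len(total_score)):
--             if total_score[i] > ret :
--                 ret = total_score[i]
--         return ret
--
--     func_b(grade)
--     max_num = func_c()
--     answer = func_a(max_num)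
--
--     return answer
-- ===== SOURCE B (Python) =====
-- def solution(grade):
--     cur_max = 0
--     cnt = 0
--     for pair in grade:
--         s = pair[0] + pair[1]
--         if s > cur_max:
--             cur_max = s
--             cnt = 1
--         elif s == cur_max:
--             cnt += 1
--     return cnt
-- ===== Notes on version B (the rewrite author's own statement) =====
-- stated objective: simpler
-- what changed: B replaces A's three separate passes (build a totals list, scan it for the max, scan it again to count) by one streaming pass that maintains a running (max, count) pair and never materializes the totals list.
import Mathlib
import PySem

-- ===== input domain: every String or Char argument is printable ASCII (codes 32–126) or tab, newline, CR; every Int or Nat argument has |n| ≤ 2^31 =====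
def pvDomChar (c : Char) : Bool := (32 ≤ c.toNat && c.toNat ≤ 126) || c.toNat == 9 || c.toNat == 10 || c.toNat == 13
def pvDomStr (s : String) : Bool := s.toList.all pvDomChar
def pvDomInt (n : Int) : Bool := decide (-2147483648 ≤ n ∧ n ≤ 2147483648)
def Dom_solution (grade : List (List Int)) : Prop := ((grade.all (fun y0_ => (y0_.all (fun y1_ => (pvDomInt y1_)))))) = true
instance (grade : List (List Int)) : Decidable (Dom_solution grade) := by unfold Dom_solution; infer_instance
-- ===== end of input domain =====

-- B is a single streaming pass keeping a running (max, count) pair, instead of A's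
-- three passes over a materialized totals list (objective: simpler).

-- ===== PORT A =====
-- row sum grade[i][0] + grade[i][1]; exact inside Pre_ (rows have ≥ 2 elements)
def pvRowSum (r : List Int) : Int :=
  (PySem.List.pyGet? r 0).getD 0 + (PySem.List.pyGet? r 1).getD 0

def solution (grade : List (List Int)) : Int :=
  -- func_b: build total_score
  let total_score : List Int := grade.foldl (fun acc r => acc ++ [pvRowSum r]) []
  -- func_c: max with 0 floor
  let max_num : Int := total_score.foldl (fun ret t => if t > ret then t else ret) 0
  -- func_a: count occurrences of max_num
  total_score.foldl (fun ret t => if t = max_num then ret + 1 else ret) 0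

-- ===== PORT B =====
def pvStep (p : Int × Int) (r : List Int) : Int × Int :=
  let s := pvRowSum r
  if s > p.1 then (s, 1) else if s = p.1 then (p.1, p.2 + 1) else p

def solution_alt (grade : List (List Int)) : Int :=
  (grade.foldl pvStep (0, 0)).2

-- ===== PRECONDITION & SPEC =====
-- Pre_ excludes inputs on which A (and B) raise IndexError: a row with fewer than 2 scores.
def Pre_solution (grade : List (List Int)) : Prop :=
  ∀ r ∈ grade, 2 ≤ r.length
instance (grade : List (List Int)) : Decidable (Pre_solution grade) := by
  unfold Pre_solution; infer_instance

def pvWitness_solution : List (List Int) := [[1, 2], [3, 0], [2, 1]]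

def Spec_solution (grade : List (List Int)) (out : Int) : Prop := out = solution_alt grade
instance (grade : List (List Int)) (out : Int) : Decidable (Spec_solution grade out) := by unfold Spec_solution; infer_instance

-- ===== CLAIM (what is proved, stated in full; the proofs are below) =====
def Claim_equal_solution : Prop := ∀ (grade : List (List Int)), Dom_solution grade → Pre_solution grade → Spec_solution grade (solution grade)

-- ===== LEMMAS AND PROOFS =====

-- proof-only abbreviations for A's two scan folds
def pvMaxf (m : Int) (ts : List Int) : Int :=
  ts.foldl (fun ret t => if t > ret then t else ret) m

def pvCntf (x : Int) (c : Int) (ts : List Int) : Int :=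
  ts.foldl (fun ret t => if t = x then ret + 1 else ret) c

-- A's totals list is grade.map pvRowSum
theorem pv_totals_eq (grade : List (List Int)) (acc : List Int) :
    grade.foldl (fun acc r => acc ++ [pvRowSum r]) acc = acc ++ grade.map pvRowSum := by
  induction grade generalizing acc with
  | nil => simp
  | cons r gs ih => simp [List.foldl, ih]

theorem pv_maxf_cons (m t : Int) (ts : List Int) :
    pvMaxf m (t :: ts) = pvMaxf (if t > m then t else m) ts := rfl

-- running max is ≥ its seed
theorem pv_max_ge (ts : List Int) (m : Int) : m ≤ pvMaxf m ts := by
  induction ts generalizing m with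
  | nil => simp [pvMaxf]
  | cons t ts ih =>
    rw [pv_maxf_cons]
    split_ifs with h
    · exact le_trans (le_of_lt h) (ih t)
    · exact ih m

-- A's count fold is additive in its seed
theorem pv_cnt_shift (ts : List Int) (x c : Int) :
    pvCntf x c ts = c + pvCntf x 0 ts := by
  induction ts generalizing c with
  | nil => simp [pvCntf]
  | cons t ts ih =>
    simp only [pvCntf, List.foldl]
    split_ifs with h
    · show pvCntf x (c + 1) ts = c + pvCntf x (0 + 1) ts
      rw [ih (c + 1), ih (0 + 1)]; ring
    · show pvCntf x c ts = c + pvCntf x 0 ts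
      exact ih c

theorem pv_cnt_cons (x t c : Int) (ts : List Int) :
    pvCntf x c (t :: ts) = c + (if t = x then 1 else 0) + pvCntf x 0 ts := by
  simp only [pvCntf, List.foldl]
  split_ifs with h
  · show pvCntf x (c + 1) ts = c + 1 + pvCntf x 0 ts
    rw [pv_cnt_shift ts x (c + 1)]
  · show pvCntf x c ts = c + 0 + pvCntf x 0 ts
    rw [pv_cnt_shift ts x c]; ring

-- main invariant: B's fused fold computes (max, adjusted count)
theorem pv_main (ts : List Int) (m c : Int) :
    ts.foldl (fun p t => if t > p.1 then (t, 1) else if t = p.1 then (p.1, p.2 + 1) else p) (m, c)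
      = (pvMaxf m ts, (if m = pvMaxf m ts then c else 0) + pvCntf (pvMaxf m ts) 0 ts) := by
  induction ts generalizing m c with
  | nil => simp [pvMaxf, pvCntf]
  | cons t ts ih =>
    rw [List.foldl_cons, pv_maxf_cons, pv_cnt_cons]
    by_cases h1 : t > m
    · simp only [if_pos h1]
      rw [ih t 1]
      have hM := pv_max_ge ts t
      have hmM : ¬ (m = pvMaxf t ts) := by omega
      rw [if_neg hmM]
      exact Prod.ext rfl (by ring_nf)
    · simp only [if_neg h1]
      by_cases h2 : t = m
      · simp only [if_pos h2]
        rw [ih m (c + 1)]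
        refine Prod.ext rfl ?_
        subst h2
        by_cases h3 : t = pvMaxf t ts
        · rw [if_pos h3, if_pos h3, if_pos h3]; ring
        · rw [if_neg h3, if_neg h3, if_neg h3]; ring
      · simp only [if_neg h2]
        rw [ih m c]
        have hM := pv_max_ge ts m
        have htM : ¬ (t = pvMaxf m ts) := by omega
        rw [if_neg htM]
        exact Prod.ext rfl (by ring)

-- B's fold over grade is the fused fold over the totals list
theorem pv_alt_map (grade : List (List Int)) (p : Int × Int) :
    grade.foldl pvStep p
      = (grade.map pvRowSum).foldl
          (fun p t => if t > p.1 then (t, 1) else if t = p.1 then (p.1, p.2 + 1) else p) p := by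
  induction grade generalizing p with
  | nil => rfl
  | cons r gs ih => simp [List.foldl, pvStep, ih]

-- ===== VERDICT (by name: the statement is the Claim_ definition above) =====
theorem solution_spec : Claim_equal_solution := by
  intro grade _ _
  unfold Spec_solution solution solution_alt
  rw [pv_totals_eq, pv_alt_map, pv_main]
  simp only [List.nil_append]
  show pvCntf (pvMaxf 0 (grade.map pvRowSum)) 0 (grade.map pvRowSum) = _
  split_ifs <;> simp [pvMaxf, pvCntf]
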